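-- pv_equiv track=rewrite | github.com/eunhee-dev/problem-solving | 0x0d_simulation/18808/solve.py | stick
-- ===== SOURCE A (Python) =====
-- def stick(board: list[list[int]], paper: list[list[int]], bx: int, by: int) -> bool:
--     r, c = len(paper), len(paper[0])
--     sticker_coords = []
--     for i in range(r):
--         for j in range(c):
--             if paper[i][j] != 1:
--                 continue
--             if board[bx + i][by + j] == 1:
--                 return False
--             sticker_coords.append((bx + i, by + j))
--
--     for sx, sy in sticker_coords:
--         board[sx][sy] = 1
--     return True
-- ===== SOURCE B (Python) =====
-- def stick(board: list[list[int]], paper: list[list[int]], bx: int, by: int) -> bool: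
--     # Single flattened cell index k over r*c cells; coordinates recovered with
--     # divmod-style arithmetic. No nested loops, no coordinate buffer.
--     c = len(paper[0])
--     n = len(paper) * c
--     k = 0
--     while k < n:
--         if paper[k // c][k % c] == 1 and board[bx + k // c][by + k % c] == 1:
--             return False
--         k += 1
--     k = 0
--     while k < n:
--         if paper[k // c][k % c] == 1:
--             board[bx + k // c][by + k % c] = 1
--         k += 1
--     return True
-- ===== Notes on version B (the rewrite author's own statement) =====
-- stated objective: alternative
-- what changed: Replaces A's nested row/column for-loops with a coordinate buffer by a single flattened cell index k in [0, r*c) scanned by while-loops, recovering (i, j) as (k // c, k % c) with divmod arithmetic and no intermediate list; the check pass short-circuits at the first conflict exactly like A, so exceptions and the in-place board mutation coincide with A's on every input.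
import Mathlib
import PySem

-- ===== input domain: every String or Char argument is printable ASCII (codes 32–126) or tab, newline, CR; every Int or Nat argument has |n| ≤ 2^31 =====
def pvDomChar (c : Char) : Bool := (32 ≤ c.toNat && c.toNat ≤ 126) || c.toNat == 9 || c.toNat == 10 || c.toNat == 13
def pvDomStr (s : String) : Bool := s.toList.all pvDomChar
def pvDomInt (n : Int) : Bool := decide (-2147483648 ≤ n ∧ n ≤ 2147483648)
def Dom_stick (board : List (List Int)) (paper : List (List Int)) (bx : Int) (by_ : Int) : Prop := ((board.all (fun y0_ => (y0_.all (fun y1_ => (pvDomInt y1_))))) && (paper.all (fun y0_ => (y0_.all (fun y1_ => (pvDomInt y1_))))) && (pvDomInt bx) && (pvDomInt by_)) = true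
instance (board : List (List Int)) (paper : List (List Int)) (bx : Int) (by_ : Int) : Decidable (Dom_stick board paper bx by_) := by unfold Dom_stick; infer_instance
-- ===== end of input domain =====

-- B replaces A's nested row/column loops plus coordinate buffer by a single flattened cell index
-- scanned with divmod arithmetic (objective: alternative). Both Pythons mutate `board` in place
-- identically on success; only the RETURN value is proved here (the marking pass of each program
-- only mutates board and does not affect the returned value, so it is not modelled).


-- ===== PORT A =====
-- inner loop 'for j in range(c)': collects coords, 'none' = early 'return False'
def stickInner (board : List (List Int)) (row : List Int) (bi : Int) (by_ : Int)
    (js : List Int) (acc : List (Int × Int)) : Option (List (Int × Int)) :=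
  match js with
  | [] => some acc
  | j :: js' =>
    if PySem.List.pyGetD row j 0 ≠ 1 then stickInner board row bi by_ js' acc
    else if PySem.List.pyGetD (PySem.List.pyGetD board bi []) (by_ + j) 0 = 1 then none
    else stickInner board row bi by_ js' (acc ++ [(bi, by_ + j)])

-- outer loop 'for i in range(r)'
def stickOuter (board paper : List (List Int)) (bx by_ c : Int)
    (is : List Int) (acc : List (Int × Int)) : Option (List (Int × Int)) :=
  match is with
  | [] => some acc
  | i :: is' =>
    match stickInner board (PySem.List.pyGetD paper i []) (bx + i) by_
        (PySem.List.pyRange 0 c 1) acc with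
    | none => none
    | some acc' => stickOuter board paper bx by_ c is' acc'

def stick (board : List (List Int)) (paper : List (List Int)) (bx : Int) (by_ : Int) : Bool :=
  -- r = len(paper), c = len(paper[0]) written inline
  match stickOuter board paper bx by_ ((PySem.List.pyGetD paper 0 ([] : List Int)).length : Int)
      (PySem.List.pyRange 0 (paper.length : Int) 1) [] with
  | none => false
  | some _ =>
    -- the final 'for sx, sy in sticker_coords: board[sx][sy] = 1' only mutates board (side effect,
    -- see header); it does not affect the returned value
    true

-- ===== PORT B =====
-- B's first while-loop: flattened scan 'while k < n: if paper[k//c][k%c]==1 and board[bx+k//c][by+k%c]==1: return False; k += 1'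
def stickScan (board paper : List (List Int)) (bx by_ c n k : Int) : Bool :=
  if h : k < n then
    if PySem.List.pyGetD (PySem.List.pyGetD paper (PySem.Int.floordiv k c) []) (PySem.Int.mod k c) 0 = 1 ∧
       PySem.List.pyGetD (PySem.List.pyGetD board (bx + PySem.Int.floordiv k c) []) (by_ + PySem.Int.mod k c) 0 = 1
    then false
    else stickScan board paper bx by_ c n (k + 1)
  else true
termination_by (n - k).toNat
decreasing_by omega

def stick_alt (board : List (List Int)) (paper : List (List Int)) (bx : Int) (by_ : Int) : Bool :=
  -- c = len(paper[0]); n = len(paper) * c; first while-loop from k = 0.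
  -- B's second while-loop only mutates board (side effect, see header); after it B returns True,
  -- which is exactly the value stickScan produces when no conflict was found.
  stickScan board paper bx by_ ((PySem.List.pyGetD paper 0 ([] : List Int)).length : Int)
    ((paper.length : Int) * ((PySem.List.pyGetD paper 0 ([] : List Int)).length : Int)) 0

-- ===== PRECONDITION & SPEC =====
-- Python cell classification used by Pre_ (paper cell (i,j), scanned in row-major order):
-- cellBad: the cell makes Python raise (paper row too short, or a sticker cell whose board access
-- is out of range); cellConf: the cell is a conflict (sticker cell over an occupied board cell).
def cellBad (board paper : List (List Int)) (bx by_ : Int) (i j : Nat) : Bool :=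
  !decide (j < (paper.getD i []).length) ||
  (decide ((paper.getD i []).getD j 0 = 1) &&
    (!decide (PySem.Raise.InRange board.length (bx + (i : Int))) ||
     !decide (PySem.Raise.InRange (PySem.List.pyGetD board (bx + (i : Int)) []).length (by_ + (j : Int)))))

def cellConf (board paper : List (List Int)) (bx by_ : Int) (i j : Nat) : Bool :=
  decide (j < (paper.getD i []).length) && decide ((paper.getD i []).getD j 0 = 1) &&
  decide (PySem.Raise.InRange board.length (bx + (i : Int))) &&
  decide (PySem.Raise.InRange (PySem.List.pyGetD board (bx + (i : Int)) []).length (by_ + (j : Int))) &&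
  decide (PySem.List.pyGetD (PySem.List.pyGetD board (bx + (i : Int)) []) (by_ + (j : Int)) 0 = 1)

-- Pre_ = exactly the inputs on which the Python A returns normally (no exception): paper is
-- nonempty and every cell that would raise is strictly preceded (row-major) by a conflict cell,
-- at which both programs already returned False.
def Pre_stick (board : List (List Int)) (paper : List (List Int)) (bx : Int) (by_ : Int) : Prop :=
  paper ≠ [] ∧
  ((List.range paper.length).all fun i => (List.range paper.headI.length).all fun j =>
    !(cellBad board paper bx by_ i j) ||
    ((List.range paper.length).any fun i' => (List.range paper.headI.length).any fun j' =>
      (decide (i' < i) || (decide (i' = i) && decide (j' < j))) &&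
      cellConf board paper bx by_ i' j')) = true
instance (board : List (List Int)) (paper : List (List Int)) (bx : Int) (by_ : Int) : Decidable (Pre_stick board paper bx by_) := by unfold Pre_stick; infer_instance

def pvWitness_stick : List (List Int) × List (List Int) × Int × Int := ([[0, 0], [0, 0]], [[1]], 0, 0)

def Spec_stick (board : List (List Int)) (paper : List (List Int)) (bx : Int) (by_ : Int) (out : Bool) : Prop := out = stick_alt board paper bx by_
instance (board : List (List Int)) (paper : List (List Int)) (bx : Int) (by_ : Int) (out : Bool) : Decidable (Spec_stick board paper bx by_ out) := by unfold Spec_stick; infer_instance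

-- ===== CLAIM (what is proved, stated in full; the proofs are below) =====
def Claim_equal_stick : Prop := ∀ (board : List (List Int)) (paper : List (List Int)) (bx : Int) (by_ : Int), Dom_stick board paper bx by_ → Pre_stick board paper bx by_ → Spec_stick board paper bx by_ (stick board paper bx by_)

-- ===== LEMMAS AND PROOFS =====

-- A's inner loop hits 'return False' independently of the accumulator, exactly when some j conflicts
theorem stickInner_isNone (board : List (List Int)) (row : List Int) (bi by_ : Int) :
    ∀ (js : List Int) (acc : List (Int × Int)),
    (stickInner board row bi by_ js acc).isNone =
      js.any (fun j =>
        decide (PySem.List.pyGetD row j 0 = 1) &&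
        decide (PySem.List.pyGetD (PySem.List.pyGetD board bi []) (by_ + j) 0 = 1)) := by
  intro js
  induction js with
  | nil => intro acc; simp [stickInner]
  | cons j js' ih =>
    intro acc
    simp only [stickInner, List.any_cons]
    by_cases h1 : PySem.List.pyGetD row j 0 ≠ 1
    · simp [h1, ih]
    · simp only [ne_eq, not_not] at h1
      by_cases h2 : PySem.List.pyGetD (PySem.List.pyGetD board bi []) (by_ + j) 0 = 1
      · simp [h1, h2]
      · simp [h1, h2, ih]

-- A's outer loop returns 'none' exactly when some row has a conflicting j
theorem stickOuter_isNone (board paper : List (List Int)) (bx by_ c : Int) :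
    ∀ (is : List Int) (acc : List (Int × Int)),
    (stickOuter board paper bx by_ c is acc).isNone =
      is.any (fun i =>
        (PySem.List.pyRange 0 c 1).any (fun j =>
          decide (PySem.List.pyGetD (PySem.List.pyGetD paper i []) j 0 = 1) &&
          decide (PySem.List.pyGetD (PySem.List.pyGetD board (bx + i) []) (by_ + j) 0 = 1))) := by
  intro is
  induction is with
  | nil => intro acc; simp [stickOuter]
  | cons i is' ih =>
    intro acc
    simp only [stickOuter, List.any_cons]
    have h := stickInner_isNone board (PySem.List.pyGetD paper i []) (bx + i) by_
      (PySem.List.pyRange 0 c 1) acc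
    rcases hinner : stickInner board (PySem.List.pyGetD paper i []) (bx + i) by_
        (PySem.List.pyRange 0 c 1) acc with _ | acc'
    · rw [hinner] at h
      simp only [Option.isNone_none] at h
      simp [← h]
    · rw [hinner] at h
      simp only [Option.isNone_some] at h
      rw [← h, Bool.false_or]
      exact ih acc'

-- B's while-loop search equals (the negation of) an 'any' over the remaining flattened indices
theorem stickScan_eq_not_any (board paper : List (List Int)) (bx by_ c n : Int) :
    ∀ (k : Int),
    stickScan board paper bx by_ c n k =
      !((PySem.List.pyRange k n 1).any (fun m =>
        decide (PySem.List.pyGetD (PySem.List.pyGetD paper (PySem.Int.floordiv m c) []) (PySem.Int.mod m c) 0 = 1) &&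
        decide (PySem.List.pyGetD (PySem.List.pyGetD board (bx + PySem.Int.floordiv m c) []) (by_ + PySem.Int.mod m c) 0 = 1))) := by
  have H : ∀ (fuel : Nat) (k : Int), (n - k).toNat ≤ fuel →
      stickScan board paper bx by_ c n k =
      !((PySem.List.pyRange k n 1).any (fun m =>
        decide (PySem.List.pyGetD (PySem.List.pyGetD paper (PySem.Int.floordiv m c) []) (PySem.Int.mod m c) 0 = 1) &&
        decide (PySem.List.pyGetD (PySem.List.pyGetD board (bx + PySem.Int.floordiv m c) []) (by_ + PySem.Int.mod m c) 0 = 1))) := by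
    intro fuel
    induction fuel with
    | zero =>
      intro k hk
      have hnk : ¬ k < n := by omega
      rw [stickScan]
      simp [hnk, PySem.List.pyRange_one_eq_nil (by omega : n ≤ k)]
    | succ m ih =>
      intro k hk
      by_cases hkn : k < n
      · rw [stickScan, PySem.List.pyRange_one_cons hkn]
        simp only [hkn, dif_pos, List.any_cons]
        by_cases hc : PySem.List.pyGetD (PySem.List.pyGetD paper (PySem.Int.floordiv k c) []) (PySem.Int.mod k c) 0 = 1 ∧
            PySem.List.pyGetD (PySem.List.pyGetD board (bx + PySem.Int.floordiv k c) []) (by_ + PySem.Int.mod k c) 0 = 1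
        · simp [hc.1, hc.2]
        · rw [if_neg hc, ih (k + 1) (by omega)]
          rcases not_and_or.mp hc with h | h <;> simp [h]
      · rw [stickScan]
        simp [hkn, PySem.List.pyRange_one_eq_nil (by omega : n ≤ k)]
  intro k
  exact H (n - k).toNat k le_rfl

-- flattening bijection: any over k ∈ [0, r*c) with (k // c, k % c) = nested any over i ∈ [0,r), j ∈ [0,c)
theorem any_flatten (g : Int → Int → Bool) (r c : Nat) :
    (PySem.List.pyRange 0 ((r : Int) * (c : Int)) 1).any
      (fun k => g (PySem.Int.floordiv k (c : Int)) (PySem.Int.mod k (c : Int)))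
    = (PySem.List.pyRange 0 (r : Int) 1).any
        (fun i => (PySem.List.pyRange 0 (c : Int) 1).any (fun j => g i j)) := by
  rw [Bool.eq_iff_iff]
  simp only [List.any_eq_true, PySem.List.mem_pyRange_one]
  constructor
  · rintro ⟨k, ⟨hk0, hkn⟩, hg⟩
    have hc : (0 : Int) < (c : Int) := by
      rcases Nat.eq_zero_or_pos c with h | h
      · subst h; simp at hkn; omega
      · exact_mod_cast h
    rw [PySem.Int.floordiv_eq_ediv_of_pos hc, PySem.Int.mod_eq_emod_of_pos hc] at hg
    refine ⟨k / (c : Int), ⟨Int.ediv_nonneg hk0 (by omega), ?_⟩,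
      k % (c : Int), ⟨Int.emod_nonneg k (by omega), Int.emod_lt_of_pos k hc⟩, hg⟩
    rw [Int.ediv_lt_iff_lt_mul hc]
    exact hkn
  · rintro ⟨i, ⟨hi0, hir⟩, j, ⟨hj0, hjc⟩, hg⟩
    refine ⟨j + i * (c : Int), ⟨by positivity, ?_⟩, ?_⟩
    · nlinarith [mul_le_mul_of_nonneg_right (show i ≤ (r : Int) - 1 by omega)
        (show (0 : Int) ≤ (c : Int) by positivity)]
    · have hc : (0 : Int) < (c : Int) := by omega
      rw [PySem.Int.floordiv_eq_ediv_of_pos hc, PySem.Int.mod_eq_emod_of_pos hc,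
        Int.add_mul_ediv_right j i (by omega), Int.ediv_eq_zero_of_lt hj0 hjc,
        Int.add_mul_emod_self_right, Int.emod_eq_of_lt hj0 hjc]
      simpa using hg

-- ===== VERDICT (by name: the statement is the Claim_ definition above) =====
theorem stick_spec : Claim_equal_stick := by
  intro board paper bx by_ _ _
  unfold Spec_stick stick stick_alt
  rw [stickScan_eq_not_any, any_flatten
    (fun i j => decide (PySem.List.pyGetD (PySem.List.pyGetD paper i []) j 0 = 1) &&
      decide (PySem.List.pyGetD (PySem.List.pyGetD board (bx + i) []) (by_ + j) 0 = 1))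
    paper.length (PySem.List.pyGetD paper 0 ([] : List Int)).length]
  have hA := stickOuter_isNone board paper bx by_
    ((PySem.List.pyGetD paper 0 ([] : List Int)).length : Int)
    (PySem.List.pyRange 0 (paper.length : Int) 1) []
  rw [← hA]
  rcases hout : stickOuter board paper bx by_
      ((PySem.List.pyGetD paper 0 ([] : List Int)).length : Int)
      (PySem.List.pyRange 0 (paper.length : Int) 1) [] with _ | acc <;> simp
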